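-- pv_equiv track=rewrite | github.com/Razorback360/unspammer-backend | app/services/classifier.py | _is_mass_mail_domain
-- ===== SOURCE A (Python) =====
-- MASS_MAIL_KEYWORDS = {
--     "mailchimp",
--     "sendgrid",
--     "constantcontact",
--     "hubspot",
--     "noreply",
--     "no-reply",
--     "donotreply",
--     "marketing",
--     "newsletter",
--     "notifications",
--     "mailer",
--     "campaigns",
-- }
--
-- def _is_mass_mail_domain(domain: str) -> bool:
--     parts = domain.split(".")
--     for part in parts:
--         if part in MASS_MAIL_KEYWORDS:
--             return True
--     for keyword in MASS_MAIL_KEYWORDS: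
--         if domain.startswith(keyword + ".") or f".{keyword}." in domain:
--             return True
--     return False
-- ===== SOURCE B (Python) =====
-- MASS_MAIL_KEYWORDS = {
--     "mailchimp",
--     "sendgrid",
--     "constantcontact",
--     "hubspot",
--     "noreply",
--     "no-reply",
--     "donotreply",
--     "marketing",
--     "newsletter",
--     "notifications",
--     "mailer",
--     "campaigns",
-- }
--
-- def _is_mass_mail_domain(domain: str) -> bool:
--     return not MASS_MAIL_KEYWORDS.isdisjoint(domain.split("."))
-- ===== Notes on version B (the rewrite author's own statement) =====
-- stated objective: simpler
-- what changed: B replaces A's two explicit loops (per-segment membership test plus a prefix/'.keyword.'-substring scan over every keyword, which is provably redundant: any match of it is already a split segment) with a single set-disjointness test on the split segments.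
import Mathlib
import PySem

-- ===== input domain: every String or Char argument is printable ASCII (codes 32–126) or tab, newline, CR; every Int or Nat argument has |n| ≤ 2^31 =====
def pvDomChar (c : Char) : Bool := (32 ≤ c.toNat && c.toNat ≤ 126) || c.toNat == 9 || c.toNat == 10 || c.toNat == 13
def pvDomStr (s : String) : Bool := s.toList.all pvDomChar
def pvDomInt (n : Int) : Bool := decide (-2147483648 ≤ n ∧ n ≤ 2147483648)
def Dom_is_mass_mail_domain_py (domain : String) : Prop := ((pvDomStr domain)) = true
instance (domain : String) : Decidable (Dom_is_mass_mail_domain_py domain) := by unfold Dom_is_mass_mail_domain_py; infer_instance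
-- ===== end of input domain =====

-- B replaces A's two loops (per-segment membership test plus a redundant prefix/substring scan
-- over the keyword set) by a single set-disjointness test on the split segments: simpler.

-- the module constant MASS_MAIL_KEYWORDS (a Python set, shared by both implementations)
def pvMassMailKeywords : PySem.Set String :=
  PySem.Set.ofList ["mailchimp", "sendgrid", "constantcontact", "hubspot", "noreply",
    "no-reply", "donotreply", "marketing", "newsletter", "notifications", "mailer", "campaigns"]

-- ===== PORT A =====
def is_mass_mail_domain_py (domain : String) : Bool :=
  -- parts = domain.split(".")  (sep "." is nonempty, so split? is never none)
  let parts : List String := (PySem.Str.split? domain ".").getD []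
  -- for part in parts: if part in MASS_MAIL_KEYWORDS: return True
  if parts.any (fun part => pvMassMailKeywords.contains part) then true
  -- for keyword in MASS_MAIL_KEYWORDS: if domain.startswith(keyword + ".") or f".{keyword}." in domain: return True
  -- (iterated in the literal order; Python's set iteration order cannot affect the any-result)
  else if (pvMassMailKeywords : List String).any (fun keyword =>
      PySem.Str.startswith domain (keyword ++ ".") || PySem.Str.isIn ("." ++ keyword ++ ".") domain) then true
  else false

-- ===== PORT B =====
def is_mass_mail_domain_py_alt (domain : String) : Bool :=
  -- not MASS_MAIL_KEYWORDS.isdisjoint(domain.split(".")): isdisjoint holds iff no element of the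
  -- iterable is in the set
  !(((PySem.Str.split? domain ".").getD []).all (fun p => !(pvMassMailKeywords.contains p)))

-- ===== PRECONDITION & SPEC =====
def Spec_is_mass_mail_domain_py (domain : String) (out : Bool) : Prop := out = is_mass_mail_domain_py_alt domain
instance (domain : String) (out : Bool) : Decidable (Spec_is_mass_mail_domain_py domain out) := by unfold Spec_is_mass_mail_domain_py; infer_instance

-- ===== CLAIM (what is proved, stated in full; the proofs are below) =====
def Claim_equal_is_mass_mail_domain_py : Prop := ∀ (domain : String), Dom_is_mass_mail_domain_py domain → Spec_is_mass_mail_domain_py domain (is_mass_mail_domain_py domain)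

-- ===== LEMMAS AND PROOFS =====

-- proof-only model of splitting on '.'
def pvSplitDot : List Char → List (List Char)
  | [] => [[]]
  | c :: rest =>
    if c = '.' then [] :: pvSplitDot rest
    else
      match pvSplitDot rest with
      | [] => [[c]]
      | h :: t => (c :: h) :: t

theorem pvSplitDot_ne_nil (l : List Char) : pvSplitDot l ≠ [] := by
  cases l with
  | nil => simp [pvSplitDot]
  | cons c rest =>
    simp only [pvSplitDot]
    split
    · simp
    · cases pvSplitDot rest <;> simp

theorem pv_splitOn_go_eq : ∀ (fuel : Nat) (l cur : List Char) (acc : List (List Char)),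
    l.length ≤ fuel →
    PySem.Chars.splitOn.go ['.'] fuel l cur acc =
      acc.reverse ++ (match pvSplitDot l with
                      | [] => [cur.reverse]
                      | h :: t => (cur.reverse ++ h) :: t) := by
  intro fuel
  induction fuel with
  | zero =>
    intro l cur acc h
    have hl : l = [] := by cases l with
      | nil => rfl
      | cons c r => simp at h
    subst hl
    simp [PySem.Chars.splitOn.go, pvSplitDot]
  | succ n ih =>
    intro l cur acc h
    cases l with
    | nil => simp [PySem.Chars.splitOn.go, pvSplitDot]
    | cons c rest =>
      by_cases hc : c = '.'
      · subst hc
        have hpre : List.isPrefixOf ['.'] ('.' :: rest) = true := by simp [List.isPrefixOf]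
        simp only [PySem.Chars.splitOn.go, hpre, if_true, List.length_cons, List.length_nil,
          List.drop_succ_cons, List.drop_zero]
        rw [ih rest [] (cur.reverse :: acc) (by simpa using Nat.le_of_succ_le_succ h)]
        rcases hs : pvSplitDot rest with _ | ⟨hh, tt⟩
        · exact absurd hs (pvSplitDot_ne_nil rest)
        · simp [pvSplitDot, hs]
      · have hpre : List.isPrefixOf ['.'] (c :: rest) = false := by
          simp [List.isPrefixOf]
          exact fun hcc => absurd hcc.symm hc
        simp only [PySem.Chars.splitOn.go, hpre]
        rw [ih rest (c :: cur) acc (by simpa using Nat.le_of_succ_le_succ h)]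
        rcases hs : pvSplitDot rest with _ | ⟨hh, tt⟩
        · exact absurd hs (pvSplitDot_ne_nil rest)
        · simp [pvSplitDot, hs, hc]

theorem pv_splitOn_dot (l : List Char) : PySem.Chars.splitOn l ['.'] = pvSplitDot l := by
  unfold PySem.Chars.splitOn
  rw [pv_splitOn_go_eq (l.length + 1) l [] [] (by omega)]
  rcases hs : pvSplitDot l with _ | ⟨h, t⟩
  · exact absurd hs (pvSplitDot_ne_nil l)
  · simp

theorem pvSplitDot_prefix (kw : List Char) (rest : List Char) (h : ('.' : Char) ∉ kw) :
    pvSplitDot (kw ++ '.' :: rest) = kw :: pvSplitDot rest := by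
  induction kw with
  | nil => simp [pvSplitDot]
  | cons c kw' ih =>
    have hc : c ≠ '.' := fun hc => h (hc ▸ List.mem_cons_self ..)
    have h' : ('.' : Char) ∉ kw' := fun hm => h (List.mem_cons_of_mem _ hm)
    simp only [List.cons_append, pvSplitDot, if_neg hc, ih h']

theorem pv_mem_of_prefix (kw l : List Char) (hk : ('.' : Char) ∉ kw)
    (h : (kw ++ ['.']) <+: l) : kw ∈ pvSplitDot l := by
  rcases h with ⟨t, ht⟩
  have : l = kw ++ '.' :: t := by rw [← ht]; simp
  rw [this, pvSplitDot_prefix kw t hk]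
  exact List.mem_cons_self ..

theorem pv_mem_tail_of_mid (kw suf : List Char) (hk : ('.' : Char) ∉ kw) :
    ∀ pre : List Char, kw ∈ (pvSplitDot (pre ++ '.' :: (kw ++ '.' :: suf))).tail := by
  intro pre
  induction pre with
  | nil =>
    simp only [List.nil_append, pvSplitDot, pvSplitDot_prefix kw suf hk]
    exact List.mem_cons_self ..
  | cons c pre' ih =>
    by_cases hc : c = '.'
    · subst hc
      simp only [List.cons_append, pvSplitDot]
      exact List.mem_of_mem_tail ih
    · simp only [List.cons_append, pvSplitDot, if_neg hc]
      rcases hs : pvSplitDot (pre' ++ '.' :: (kw ++ '.' :: suf)) with _ | ⟨h, t⟩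
      · exact absurd hs (pvSplitDot_ne_nil _)
      · rw [hs] at ih
        simpa using ih

theorem pv_mem_of_infix (kw l : List Char) (hk : ('.' : Char) ∉ kw)
    (h : ('.' :: (kw ++ ['.'])) <:+: l) : kw ∈ pvSplitDot l := by
  rcases h with ⟨pre, suf, hps⟩
  have hl : l = pre ++ '.' :: (kw ++ '.' :: suf) := by rw [← hps]; simp
  rw [hl]
  exact List.mem_of_mem_tail (pv_mem_tail_of_mid kw suf hk pre)

theorem pv_second_imp (domain kw : String) (hk : ('.' : Char) ∉ kw.toList)
    (h : (PySem.Str.startswith domain (kw ++ ".") || PySem.Str.isIn ("." ++ kw ++ ".") domain) = true) :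
    kw.toList ∈ pvSplitDot domain.toList := by
  rcases Bool.or_eq_true_iff.mp h with h | h
  · rw [PySem.Str.startswith_eq, PySem.Chars.startswith_iff] at h
    rw [String.toList_append] at h
    exact pv_mem_of_prefix _ _ hk h
  · rw [PySem.Str.isIn_iff_infix] at h
    rw [String.toList_append, String.toList_append] at h
    have : ("." : String).toList ++ kw.toList ++ ("." : String).toList
        = '.' :: (kw.toList ++ ['.']) := by simp
    rw [this] at h
    exact pv_mem_of_infix _ _ hk h

theorem pv_parts_map (domain : String) :
    ((PySem.Str.split? domain ".").getD []).map String.toList = pvSplitDot domain.toList := by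
  have h := PySem.Str.split?_map domain "."
  have hsep : ("." : String).toList = ['.'] := rfl
  rw [hsep] at h
  unfold PySem.Chars.split? at h
  simp only [List.isEmpty_cons] at h
  cases hs : PySem.Str.split? domain "." with
  | none => rw [hs] at h; simp at h
  | some ps =>
    rw [hs] at h
    simp only [Option.map_some] at h
    simpa [pv_splitOn_dot] using h

-- ===== VERDICT (by name: the statement is the Claim_ definition above) =====
theorem is_mass_mail_domain_py_spec : Claim_equal_is_mass_mail_domain_py := by
  intro domain _
  unfold Spec_is_mass_mail_domain_py is_mass_mail_domain_py is_mass_mail_domain_py_alt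
  rw [← List.any_eq_not_all_not]
  dsimp only
  set parts := (PySem.Str.split? domain ".").getD [] with hparts
  cases hA : parts.any (fun part => pvMassMailKeywords.contains part) with
  | true => simp
  | false =>
    suffices hsec : (pvMassMailKeywords : List String).any (fun keyword =>
        PySem.Str.startswith domain (keyword ++ ".") || PySem.Str.isIn ("." ++ keyword ++ ".") domain) = false by
      rw [hsec]; simp
    by_contra hcon
    rw [Bool.not_eq_false, List.any_eq_true] at hcon
    obtain ⟨kw, hkwmem, hkw⟩ := hcon
    have hk : ('.' : Char) ∉ kw.toList := by
      have hm2 : kw ∈ (pvMassMailKeywords : List String) := hkwmem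
      have hlist : pvMassMailKeywords = ["mailchimp", "sendgrid", "constantcontact", "hubspot",
        "noreply", "no-reply", "donotreply", "marketing", "newsletter", "notifications",
        "mailer", "campaigns"] := by decide
      rw [hlist] at hm2
      simp only [List.mem_cons, List.not_mem_nil, or_false] at hm2
      rcases hm2 with rfl | rfl | rfl | rfl | rfl | rfl | rfl | rfl | rfl | rfl | rfl | rfl <;> decide
    have hmem : kw.toList ∈ pvSplitDot domain.toList := pv_second_imp domain kw hk hkw
    rw [← pv_parts_map domain] at hmem
    obtain ⟨p, hp, hpe⟩ := List.mem_map.mp hmem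
    have hpkw : p = kw := by
      apply String.ext
      simpa [String.toList] using hpe
    subst hpkw
    have : parts.any (fun part => pvMassMailKeywords.contains part) = true := by
      rw [List.any_eq_true]
      exact ⟨p, hp, (PySem.Set.contains_iff _ _).mpr hkwmem⟩
    rw [hA] at this
    exact Bool.false_ne_true this
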